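-- pv_equiv track=rewrite | github.com/lPrimemaster/AoC2022 | d3/day3.py | load_items
-- ===== SOURCE A (Python) =====
-- def get_priority(item: str):
--     if ord(item) >= ord('a'):
--         return ord(item) - ord('a') + 1
--     else:
--         return ord(item) - ord('A') + 27
--
-- def load_items(contents: str):
--     comp0 = {}
--     comp1 = {}
--     total = 0
--
--     for item in contents[:len(contents)//2]:
--         if item in comp0:
--             comp0[item] += 1
--         else:
--             comp0[item] = 1
--
--     for item in contents[len(contents)//2:]:
--         if item in comp1:
--             comp1[item] += 1
--         else:
--             comp1[item] = 1
--
--     pkeys = []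
--     keys = comp0.keys()
--     for k, v in comp1.items():
--         if k in keys and k not in pkeys:
--             total += get_priority(k)
--             pkeys.append(k)
--
--     return total
-- ===== SOURCE B (Python) =====
-- def get_priority(item: str):
--     if ord(item) >= ord('a'):
--         return ord(item) - ord('a') + 1
--     else:
--         return ord(item) - ord('A') + 27
--
-- def load_items(contents: str):
--     half = len(contents) // 2
--     m0 = 0
--     for c in contents[:half]:
--         m0 |= 1 << ord(c)
--     m1 = 0
--     for c in contents[half:]:
--         m1 |= 1 << ord(c)
--     both = m0 & m1
--     total = 0
--     code = 0
--     while both: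
--         if both & 1:
--             total += get_priority(chr(code))
--         both >>= 1
--         code += 1
--     return total
-- ===== Notes on version B (the rewrite author's own statement) =====
-- stated objective: alternative
-- what changed: Replaces A's two frequency-counting dicts plus manual pkeys dedup list by integer bitmasks: OR 1<<ord(c) for each half into two masks, AND them, and walk the set bits of the intersection mask summing priorities; correct because only distinct common characters matter and each corresponds to exactly one set bit.
import Mathlib
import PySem

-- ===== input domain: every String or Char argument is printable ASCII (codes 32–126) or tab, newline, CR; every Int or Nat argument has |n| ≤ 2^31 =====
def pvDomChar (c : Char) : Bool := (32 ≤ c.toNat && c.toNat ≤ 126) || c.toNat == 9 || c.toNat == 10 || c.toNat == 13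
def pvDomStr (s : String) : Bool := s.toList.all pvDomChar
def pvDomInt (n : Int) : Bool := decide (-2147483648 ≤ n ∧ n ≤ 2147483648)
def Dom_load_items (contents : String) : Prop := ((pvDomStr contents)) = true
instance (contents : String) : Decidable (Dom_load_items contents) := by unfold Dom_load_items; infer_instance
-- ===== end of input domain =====

-- B replaces A's frequency dicts and pkeys dedup list by 128-bit character bitmasks: OR each half into a mask, AND them, then walk the set bits summing priorities (alternative algorithm, similar cost).


-- ===== PORT A =====
def get_priority (item : Char) : Int :=
  if (item.toNat : Int) ≥ ('a'.toNat : Int) then (item.toNat : Int) - ('a'.toNat : Int) + 1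
  else (item.toNat : Int) - ('A'.toNat : Int) + 27

-- the counting-loop body of A ('if item in comp: comp[item] += 1 else: comp[item] = 1')
def pvCountStep (d : PySem.Dict Char Int) (item : Char) : PySem.Dict Char Int :=
  if d.contains item then d.insert item (d.getD item 0 + 1) else d.insert item 1

def load_items (contents : String) : Int :=
  let cs := contents.toList
  let n := PySem.Int.floordiv (cs.length : Int) 2
  let comp0 := (PySem.List.slice cs none (some n)).foldl pvCountStep PySem.Dict.empty
  let comp1 := (PySem.List.slice cs (some n) none).foldl pvCountStep PySem.Dict.empty
  let keys := comp0.keys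
  let res := comp1.items.foldl
      (fun (s : Int × List Char) kv =>
        if keys.contains kv.1 && !(s.2.contains kv.1)
        then (s.1 + get_priority kv.1, s.2 ++ [kv.1]) else s)
      (0, [])
  res.1

-- ===== PORT B =====
-- 'for c in part: m |= 1 << ord(c)'
def pvMask (part : List Char) : Nat :=
  part.foldl (fun m c => m ||| (1 <<< c.toNat)) 0

-- 'while both: if both & 1: total += get_priority(chr(code)); both >>= 1; code += 1'
def pvBitLoop (total : Int) (both : Nat) (code : Nat) : Int :=
  if both = 0 then total
  else pvBitLoop (if both &&& 1 = 1 then total + get_priority (Char.ofNat code) else total)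
                 (both >>> 1) (code + 1)
termination_by both
decreasing_by simpa [Nat.shiftRight_one] using Nat.div_lt_self (Nat.pos_of_ne_zero (by assumption)) one_lt_two

def load_items_alt (contents : String) : Int :=
  let cs := contents.toList
  let half := PySem.Int.floordiv (cs.length : Int) 2
  let m0 := pvMask (PySem.List.slice cs none (some half))
  let m1 := pvMask (PySem.List.slice cs (some half) none)
  pvBitLoop 0 (m0 &&& m1) 0

-- ===== PRECONDITION & SPEC =====
def Spec_load_items (contents : String) (out : Int) : Prop := out = load_items_alt contents
instance (contents : String) (out : Int) : Decidable (Spec_load_items contents out) := by unfold Spec_load_items; infer_instance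

-- ===== CLAIM (what is proved, stated in full; the proofs are below) =====
def Claim_equal_load_items : Prop := ∀ (contents : String), Dom_load_items contents → Spec_load_items contents (load_items contents)

-- ===== LEMMAS AND PROOFS =====

-- the keys of a dict built by A's counting loop are exactly set(l)
theorem pvKeys_count (l : List Char) :
    (l.foldl pvCountStep PySem.Dict.empty).keys = PySem.Set.ofList l := by
  have h : l.foldl pvCountStep PySem.Dict.empty
      = l.foldl (fun (d : PySem.Dict Char Int) x =>
          d.insert x (if d.contains x then d.getD x 0 + 1 else 1)) PySem.Dict.empty := by
    refine PySem.List.foldl_congr_mem l _ _ _ ?_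
    intro d x _
    unfold pvCountStep
    split_ifs <;> rfl
  rw [h, PySem.Dict.keys_foldl_insert]
  rfl

-- A's total/pkeys loop over a duplicate-free list sums the priorities of its P-members
theorem pvFold_sum (P : Char → Bool) (g : Char → Int) :
    ∀ (l : List Char) (t : Int) (p : List Char), l.Nodup → (∀ k ∈ l, k ∉ p) →
    (l.foldl (fun (s : Int × List Char) k =>
        if P k && !(s.2.contains k) then (s.1 + g k, s.2 ++ [k]) else s) (t, p)).1
      = t + ((l.filter P).map g).sum := by
  intro l
  induction l with
  | nil => intro t p _ _; simp
  | cons k l ih =>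
    intro t p hnd hp
    have hk : k ∉ p := hp k (by simp)
    by_cases hP : P k = true
    · have hstep : (P k && !(p.contains k)) = true := by simp [hP, hk]
      simp only [List.foldl_cons, hstep, if_true]
      rw [ih (t + g k) (p ++ [k]) hnd.of_cons ?_]
      · simp [hP]; ring
      · intro k' hk' hmem
        rcases List.mem_append.mp hmem with h | h
        · exact hp k' (List.mem_cons_of_mem _ hk') h
        · have : k' = k := by simpa using h
          exact (List.nodup_cons.mp hnd).1 (this ▸ hk')
    · have hstep : (P k && !(p.contains k)) = false := by simp [hP]
      simp only [List.foldl_cons, hstep, if_false, Bool.false_eq_true]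
      rw [ih t p hnd.of_cons (fun k' hk' => hp k' (List.mem_cons_of_mem _ hk'))]
      simp [hP]

-- the mask built by B's OR-loop has bit k set iff some char of the half has code k
theorem pvMask_testBit (l : List Char) :
    ∀ (m : Nat) (k : Nat),
      (l.foldl (fun m c => m ||| (1 <<< c.toNat)) m).testBit k
        = (m.testBit k || l.any (fun c => c.toNat == k)) := by
  induction l with
  | nil => simp
  | cons c l ih =>
    intro m k
    simp only [List.foldl_cons, List.any_cons, ih]
    rw [Nat.testBit_or]
    have : (1 <<< c.toNat) = 2 ^ c.toNat := by simp [Nat.shiftLeft_eq]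
    rw [this, Nat.testBit_two_pow]
    cases h : (c.toNat == k) <;> simp_all

-- membership in Nat.bitIndices is testBit
theorem pvMem_bitIndices : ∀ (n k : Nat), k ∈ n.bitIndices ↔ n.testBit k = true := by
  intro n
  induction n using Nat.strong_induction_on with
  | _ n ih =>
    intro k
    rcases Nat.eq_zero_or_pos n with h0 | hpos
    · simp [h0]
    have hlt : n / 2 < n := Nat.div_lt_self hpos one_lt_two
    rcases Nat.mod_two_eq_zero_or_one n with hm | hm
    · have h2 : n = 2 * (n / 2) := by omega
      rw [h2, Nat.bitIndices_two_mul]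
      cases k with
      | zero =>
        rw [← h2, Nat.testBit_zero]
        simp [hm]
      | succ k =>
        rw [Nat.testBit_succ]
        have h3 : 2 * (n / 2) / 2 = n / 2 := by omega
        rw [h3, ← ih (n / 2) hlt k]
        simp only [List.mem_map]
        constructor
        · rintro ⟨a, ha, h⟩
          have : a = k := by omega
          exact this ▸ ha
        · intro h; exact ⟨k, h, rfl⟩
    · have h2 : n = 2 * (n / 2) + 1 := by omega
      rw [h2, Nat.bitIndices_two_mul_add_one]
      cases k with
      | zero =>
        rw [← h2]
        simp only [List.mem_cons, Nat.testBit_zero, hm]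
        simp
      | succ k =>
        rw [Nat.testBit_succ]
        have h3 : (2 * (n / 2) + 1) / 2 = n / 2 := by omega
        rw [h3, ← ih (n / 2) hlt k]
        simp only [List.mem_cons, List.mem_map]
        constructor
        · rintro (h | ⟨a, ha, h⟩)
          · omega
          · have : a = k := by omega
            exact this ▸ ha
        · intro h; exact Or.inr ⟨k, h, rfl⟩

-- B's while loop sums get_priority over the set bits (shifted by code)
theorem pvBitLoop_eq : ∀ (both : Nat) (total : Int) (code : Nat),
    pvBitLoop total both code
      = total + ((both.bitIndices.map (fun k => get_priority (Char.ofNat (code + k)))).sum) := by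
  intro both
  induction both using Nat.strong_induction_on with
  | _ both ih =>
    intro total code
    rcases Nat.eq_zero_or_pos both with h0 | hpos
    · rw [pvBitLoop]; simp [h0]
    have hne : both ≠ 0 := Nat.pos_iff_ne_zero.mp hpos
    have hlt : both / 2 < both := Nat.div_lt_self hpos one_lt_two
    rw [pvBitLoop]
    simp only [hne, if_false, Nat.and_one_is_mod, Nat.shiftRight_one]
    rw [ih (both / 2) hlt]
    have hsplit : both = 2 * (both / 2) + both % 2 := by omega
    rcases Nat.mod_two_eq_zero_or_one both with hm | hm
    · rw [hm]
      conv_rhs => rw [hsplit, hm]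
      simp only [Nat.add_zero, Nat.bitIndices_two_mul, List.map_map]
      have : (fun k => get_priority (Char.ofNat (code + k))) ∘ (fun x => x + 1)
           = fun k => get_priority (Char.ofNat (code + 1 + k)) := by
        funext k; simp; ring_nf
      rw [this]
      simp
    · rw [hm]
      conv_rhs => rw [hsplit, hm]
      simp only [Nat.bitIndices_two_mul_add_one, List.map_cons, List.map_map, List.sum_cons]
      have : (fun k => get_priority (Char.ofNat (code + k))) ∘ (fun x => x + 1)
           = fun k => get_priority (Char.ofNat (code + 1 + k)) := by
        funext k; simp; ring_nf
      rw [this]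
      simp
      ring

theorem pvToNat_inj {c d : Char} (h : c.toNat = d.toNat) : c = d := by
  have := congrArg Char.ofNat h
  simpa [Char.ofNat_toNat] using this

-- ===== VERDICT (by name: the statement is the Claim_ definition above) =====
theorem load_items_spec : Claim_equal_load_items := by
  intro contents _
  unfold Spec_load_items load_items load_items_alt
  simp only []
  set cs := contents.toList with hcs
  set n := PySem.Int.floordiv (cs.length : Int) 2 with hn
  set F := PySem.List.slice cs none (some n) with hF
  set S := PySem.List.slice cs (some n) none with hS
  set comp0 := F.foldl pvCountStep PySem.Dict.empty with hc0
  set comp1 := S.foldl pvCountStep PySem.Dict.empty with hc1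
  have hk0 : comp0.keys = PySem.Set.ofList F := pvKeys_count F
  have hk1 : comp1.keys = PySem.Set.ofList S := pvKeys_count S
  have hnd : comp1.keys.Nodup := by rw [hk1]; exact PySem.Set.nodup_ofList S
  have hitems : comp1.items = comp1.keys.map (fun k => (k, comp1.getD k 0)) :=
    PySem.Dict.items_eq_map_keys comp1 hnd 0
  rw [hitems, List.foldl_map]
  have hA := pvFold_sum (fun k => comp0.keys.contains k) get_priority comp1.keys 0 [] hnd
    (by intro k _ hm; simp at hm)
  simp only [] at hA
  rw [hA, pvBitLoop_eq]
  simp only [zero_add]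
  -- both sides are sums of get_priority over duplicate-free lists with the same members
  set T : List Char := comp1.keys.filter (fun k => comp0.keys.contains k) with hT
  have hTnd : T.Nodup := hnd.filter _
  set M : Nat := pvMask F &&& pvMask S with hM
  have hMbit : ∀ k, M.testBit k = (F.any (fun c => c.toNat == k) && S.any (fun c => c.toNat == k)) := by
    intro k
    rw [hM, Nat.testBit_and]
    unfold pvMask
    rw [pvMask_testBit, pvMask_testBit]
    simp
  have hIdxNd : M.bitIndices.Nodup := Nat.bitIndices_nodup
  -- turn both list sums into Finset sums
  rw [← List.sum_toFinset _ hIdxNd, ← List.sum_toFinset _ hTnd]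
  have himg : M.bitIndices.toFinset = T.toFinset.image Char.toNat := by
    ext k
    simp only [List.mem_toFinset, Finset.mem_image, pvMem_bitIndices, hMbit]
    constructor
    · intro h
      have hF' := (Bool.and_eq_true _ _).mp h |>.1
      have hS' := (Bool.and_eq_true _ _).mp h |>.2
      rcases List.any_eq_true.mp hF' with ⟨cF, hcF, hcFk⟩
      rcases List.any_eq_true.mp hS' with ⟨cS, hcS, hcSk⟩
      have hcFk' : cF.toNat = k := by simpa using hcFk
      have hcSk' : cS.toNat = k := by simpa using hcSk
      have : cF = cS := pvToNat_inj (by omega)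
      refine ⟨cS, ?_, hcSk'⟩
      rw [hT]
      simp only [List.mem_filter]
      constructor
      · rw [hk1]; exact (PySem.Set.mem_ofList _ _).mpr hcS
      · rw [hk0]
        simp only [List.contains_eq_mem, decide_eq_true_eq]
        exact (PySem.Set.mem_ofList _ _).mpr (this ▸ hcF)
    · rintro ⟨c, hc, hck⟩
      rw [hT] at hc
      simp only [List.mem_filter] at hc
      obtain ⟨hcS, hcF⟩ := hc
      rw [hk1, PySem.Set.mem_ofList] at hcS
      rw [hk0] at hcF
      simp only [List.contains_eq_mem, decide_eq_true_eq, PySem.Set.mem_ofList] at hcF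
      refine (Bool.and_eq_true _ _).mpr ⟨?_, ?_⟩
      · exact List.any_eq_true.mpr ⟨c, hcF, by simpa using hck⟩
      · exact List.any_eq_true.mpr ⟨c, hcS, by simpa using hck⟩
  rw [himg, Finset.sum_image ?hi]
  · refine Finset.sum_congr rfl ?_
    intro c _
    simp [Char.ofNat_toNat]
  · intro a _ b _ hab
    exact pvToNat_inj hab
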